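-- pv_equiv track=rewrite | github.com/danielhers/streusle-tagger | streusle_tagger/models/streusle_tagger.py | streusle_allowed_transitions
-- ===== SOURCE A (Python) =====
-- from typing import Any, Dict, List, Optional, Set, Tuple
--
-- def streusle_allowed_transitions(labels: Dict[int, str]) -> List[Tuple[int, int]]:
--     """
--     Given labels, returns the allowed transitions when tagging STREUSLE lextags. It will
--     additionally include transitions for the start and end states, which are used
--     by the conditional random field.
--
--     Parameters
--     ----------
--     labels : ``Dict[int, str]``, required
--         A mapping {label_id -> label}. Most commonly this would be the value from
--         Vocabulary.get_index_to_token_vocabulary()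
--
--     Returns
--     -------
--     ``List[Tuple[int, int]]``
--         The allowed transitions (from_label_id, to_label_id).
--     """
--     num_labels = len(labels)
--     start_tag = num_labels
--     end_tag = num_labels + 1
--     labels_with_boundaries = list(labels.items()) + [(start_tag, "START"), (end_tag, "END")]
--
--     allowed = []
--     for from_label_index, from_label in labels_with_boundaries:
--         if from_label in ("START", "END"):
--             from_tag = from_label
--         else:
--             from_tag = from_label.split("-")[0]
--         for to_label_index, to_label in labels_with_boundaries:
--             if to_label in ("START", "END"):
--                 to_tag = to_label
--             else:
--                 to_tag = to_label.split("-")[0]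
--             if is_streusle_transition_allowed(from_tag, to_tag):
--                 allowed.append((from_label_index, to_label_index))
--     return allowed
--
-- def is_streusle_transition_allowed(from_tag: str,
--                                    to_tag: str):
--     """
--     Given a constraint type and strings ``from_tag`` and ``to_tag`` that
--     represent the origin and destination of the transition, return whether
--     the transition is allowed under the STREUSLE tagging scheme.
--
--     Parameters
--     ----------
--     from_tag : ``str``, required
--         The tag that the transition originates from. For example, if the
--         label is ``I~-V-v.cognition``, the ``from_tag`` is ``I~``.
--     to_tag : ``str``, required
--         The tag that the transition leads to. For example, if the
--         label is ``I~-V-v.cognition``, the ``to_tag`` is ``I~``.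
--
--     Returns
--     -------
--     ``bool``
--         Whether the transition is allowed under the given ``constraint_type``.
--     """
--     # pylint: disable=too-many-return-statements
--     if from_tag not in ('O', 'B', 'I_', 'I~', 'o', 'b', 'i_', 'i~', 'START', 'END'):
--         raise ValueError("Got invalid from_tag {}".format(from_tag))
--     if to_tag not in ('O', 'B', 'I_', 'I~', 'o', 'b', 'i_', 'i~', 'START', 'END'):
--         raise ValueError("Got invalid to_tag {}".format(to_tag))
--
--     if to_tag == "START" or from_tag == "END":
--         # Cannot transition into START or from END
--         return False
--
--     if from_tag == "START":
--         return to_tag in ('O', 'B')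
--     if to_tag == "END":
--         return from_tag in ('O', 'I_', 'I~')
--     return any([
--             # B can transition to o-*, b-*, I_-*, or I~-*
--             # o can transition to o-*, b-*, I_-*, or I~-*
--             from_tag in ('B', 'o') and to_tag in ('o', 'b', 'I_', 'I~'),
--             # b can transition to i_ or i~, but only if the entity tags match
--             from_tag in ('b',) and to_tag in ('i_', 'i~'),
--             # O can transition to O-*, B-*, or END
--             from_tag in ('O',) and to_tag in ('O', 'B'),
--             # I_, I~ can transition to all tags except i_-* or i~-*
--             from_tag in ('I_', 'I~') and to_tag not in ('i_', 'i~'),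
--             # i_, i~ can transition to all tags except O, B
--             from_tag in ('i_', 'i~') and to_tag not in ('O', 'B'),
--     ])
-- ===== SOURCE B (Python) =====
-- _NEXT_TAGS = {
--     'START': ('O', 'B'),
--     'O': ('O', 'B', 'END'),
--     'B': ('o', 'b', 'I_', 'I~'),
--     'o': ('o', 'b', 'I_', 'I~'),
--     'b': ('i_', 'i~'),
--     'I_': ('O', 'B', 'I_', 'I~', 'o', 'b', 'END'),
--     'I~': ('O', 'B', 'I_', 'I~', 'o', 'b', 'END'),
--     'i_': ('I_', 'I~', 'o', 'b', 'i_', 'i~'),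
--     'i~': ('I_', 'I~', 'o', 'b', 'i_', 'i~'),
--     'END': (),
-- }
--
-- def streusle_allowed_transitions(labels):
--     num_labels = len(labels)
--     boundary = [(num_labels, "START"), (num_labels + 1, "END")]
--     tagged = []
--     for index, label in list(labels.items()) + boundary:
--         tag = label if label in ("START", "END") else label.split("-")[0]
--         if tag not in _NEXT_TAGS:
--             raise ValueError("Got invalid tag {}".format(tag))
--         tagged.append((index, tag))
--     targets = {tag: [j for j, to_tag in tagged if to_tag in _NEXT_TAGS[tag]]
--                for tag in _NEXT_TAGS}
--     allowed = []
--     for index, tag in tagged: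
--         allowed.extend((index, j) for j in targets[tag])
--     return allowed
-- ===== Notes on version B (the rewrite author's own statement) =====
-- stated objective: faster
-- what changed: B replaces the per-pair split-and-boolean-check with one pass that tags every label once, a fixed transition table mapping each tag to its allowed successor tags, and precomputed per-tag target-index lists that are concatenated row by row in A's exact emission order.
import Mathlib
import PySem

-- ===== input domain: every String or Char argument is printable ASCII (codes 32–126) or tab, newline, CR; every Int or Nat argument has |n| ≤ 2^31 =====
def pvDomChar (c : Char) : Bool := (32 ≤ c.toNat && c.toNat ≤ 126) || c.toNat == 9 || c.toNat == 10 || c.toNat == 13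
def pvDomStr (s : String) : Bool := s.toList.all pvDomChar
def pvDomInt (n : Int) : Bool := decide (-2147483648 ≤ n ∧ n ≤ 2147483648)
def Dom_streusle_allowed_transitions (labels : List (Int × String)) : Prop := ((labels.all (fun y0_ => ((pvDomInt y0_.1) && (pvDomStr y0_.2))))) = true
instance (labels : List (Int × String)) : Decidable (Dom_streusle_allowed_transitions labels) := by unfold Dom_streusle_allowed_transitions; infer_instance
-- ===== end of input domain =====

-- B tags each label once and groups target indices per tag via a fixed transition table,
-- replacing A's per-pair split-and-check (intended to be faster by avoiding the quadratic tag work).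

-- shared helper: the tag of a label ("START"/"END" literal, else label.split("-")[0]); both Pythons compute it this way
def pvTagOf (l : String) : String :=
  if l == "START" || l == "END" then l
  else ((PySem.Str.split? l "-").getD []).headD ""

-- ===== PORT A =====
-- A's is_streusle_transition_allowed, assuming both tags valid (the ValueError case is excluded by Pre_)
def pvIsAllowed (f t : String) : Bool :=
  if t == "START" || f == "END" then false
  else if f == "START" then t == "O" || t == "B"
  else if t == "END" then f == "O" || f == "I_" || f == "I~"
  else ((f == "B" || f == "o") && (t == "o" || t == "b" || t == "I_" || t == "I~")) ||
       (f == "b" && (t == "i_" || t == "i~")) ||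
       (f == "O" && (t == "O" || t == "B")) ||
       ((f == "I_" || f == "I~") && !(t == "i_" || t == "i~")) ||
       ((f == "i_" || f == "i~") && !(t == "O" || t == "B"))

def streusle_allowed_transitions (labels : List (Int × String)) : List (Int × Int) :=
  let n : Int := labels.length
  let lwb := labels ++ [(n, "START"), (n + 1, "END")]
  lwb.foldl (fun acc fp =>
    let ft := pvTagOf fp.2
    lwb.foldl (fun acc2 tp =>
      let tt := pvTagOf tp.2
      if pvIsAllowed ft tt then acc2 ++ [(fp.1, tp.1)] else acc2) acc) []

-- ===== PORT B =====
-- the fixed transition table _NEXT_TAGS of Source B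
def pvNextTags : PySem.Dict String (List String) := PySem.Dict.ofList
  [("START", ["O", "B"]),
   ("O", ["O", "B", "END"]),
   ("B", ["o", "b", "I_", "I~"]),
   ("o", ["o", "b", "I_", "I~"]),
   ("b", ["i_", "i~"]),
   ("I_", ["O", "B", "I_", "I~", "o", "b", "END"]),
   ("I~", ["O", "B", "I_", "I~", "o", "b", "END"]),
   ("i_", ["I_", "I~", "o", "b", "i_", "i~"]),
   ("i~", ["I_", "I~", "o", "b", "i_", "i~"]),
   ("END", [])]

def streusle_allowed_transitions_alt (labels : List (Int × String)) : List (Int × Int) :=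
  let n : Int := labels.length
  let tagged := (labels ++ [(n, "START"), (n + 1, "END")]).map (fun p => (p.1, pvTagOf p.2))
  let targets : PySem.Dict String (List Int) :=
    pvNextTags.keys.foldl (fun d t =>
      d.insert t ((tagged.filter (fun q => (pvNextTags.getD t []).contains q.2)).map (·.1)))
      PySem.Dict.empty
  tagged.foldl (fun acc p => acc ++ (targets.getD p.2 []).map (fun j => (p.1, j))) []

-- ===== PRECONDITION & SPEC =====
def pvValidTags : List String := ["O", "B", "I_", "I~", "o", "b", "i_", "i~", "START", "END"]

-- Pre_ excludes exactly the inputs where some label's tag is invalid, on which A raises ValueError.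
def Pre_streusle_allowed_transitions (labels : List (Int × String)) : Prop :=
  ∀ p ∈ labels, pvTagOf p.2 ∈ pvValidTags
instance (labels : List (Int × String)) : Decidable (Pre_streusle_allowed_transitions labels) := by
  unfold Pre_streusle_allowed_transitions; infer_instance

def pvWitness_streusle_allowed_transitions : (List (Int × String)) :=
  [(0, "O-x"), (1, "B-V-v.cognition"), (2, "I~")]

def Spec_streusle_allowed_transitions (labels : List (Int × String)) (out : List (Int × Int)) : Prop := out = streusle_allowed_transitions_alt labels
instance (labels : List (Int × String)) (out : List (Int × Int)) : Decidable (Spec_streusle_allowed_transitions labels out) := by unfold Spec_streusle_allowed_transitions; infer_instance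

-- ===== CLAIM (what is proved, stated in full; the proofs are below) =====
def Claim_equal_streusle_allowed_transitions : Prop := ∀ (labels : List (Int × String)), Dom_streusle_allowed_transitions labels → Pre_streusle_allowed_transitions labels → Spec_streusle_allowed_transitions labels (streusle_allowed_transitions labels)

-- ===== LEMMAS AND PROOFS =====

-- B's table agrees with A's boolean transition rule on valid tags
theorem pv_table_eq : ∀ f ∈ pvValidTags, ∀ t ∈ pvValidTags,
    pvIsAllowed f t = (pvNextTags.getD f []).contains t := by decide

-- the dict comprehension: looking up a valid tag in B's `targets` gives exactly its filtered index list
theorem pv_targets_getD (tagged : List (Int × String)) (t : String) (ht : t ∈ pvValidTags) :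
    (pvNextTags.keys.foldl (fun d k =>
        d.insert k ((tagged.filter (fun q => (pvNextTags.getD k []).contains q.2)).map (·.1)))
        PySem.Dict.empty).getD t []
      = (tagged.filter (fun q => (pvNextTags.getD t []).contains q.2)).map (·.1) := by
  have hk : pvNextTags.keys = ["START","O","B","o","b","I_","I~","i_","i~","END"] := by decide
  rw [hk]
  fin_cases ht <;> · simp only [List.foldl]; simp [PySem.Dict.getD_insert]

-- one from-label row: A's filtered inner loop equals B's per-tag target list, prefixed with the from-index
theorem pv_row_eq (lwb : List (Int × String))
    (hall : ∀ p ∈ lwb, pvTagOf p.2 ∈ pvValidTags) (fp : Int × String) (hfp : fp ∈ lwb) :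
    (lwb.filter (fun tp => pvIsAllowed (pvTagOf fp.2) (pvTagOf tp.2))).map (fun tp => (fp.1, tp.1))
    = ((((lwb.map (fun p => (p.1, pvTagOf p.2))).filter
          (fun q => (pvNextTags.getD (pvTagOf fp.2) []).contains q.2)).map (·.1)).map
        (fun j => (fp.1, j))) := by
  rw [List.filter_map, List.map_map, List.map_map]
  have hfilter : lwb.filter
      ((fun q : Int × String => (pvNextTags.getD (pvTagOf fp.2) []).contains q.2) ∘
        (fun p : Int × String => (p.1, pvTagOf p.2)))
      = lwb.filter (fun tp => pvIsAllowed (pvTagOf fp.2) (pvTagOf tp.2)) :=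
    List.filter_congr (fun tp htp => (pv_table_eq _ (hall fp hfp) _ (hall tp htp)).symm)
  rw [hfilter]
  exact List.map_congr_left (fun tp _ => rfl)

-- the whole computation, stated over an arbitrary labels-with-boundaries list with valid tags
theorem pv_main (lwb : List (Int × String))
    (hall : ∀ p ∈ lwb, pvTagOf p.2 ∈ pvValidTags) :
    lwb.foldl (fun acc fp =>
      lwb.foldl (fun acc2 tp =>
        if pvIsAllowed (pvTagOf fp.2) (pvTagOf tp.2) then acc2 ++ [(fp.1, tp.1)] else acc2) acc) []
    = (lwb.map (fun p => (p.1, pvTagOf p.2))).foldl (fun acc p =>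
        acc ++ ((pvNextTags.keys.foldl (fun d t =>
            d.insert t (((lwb.map (fun p => (p.1, pvTagOf p.2))).filter
              (fun q => (pvNextTags.getD t []).contains q.2)).map (·.1))) PySem.Dict.empty).getD p.2 []).map
          (fun j => (p.1, j))) [] := by
  have hA : lwb.foldl (fun acc fp =>
      lwb.foldl (fun acc2 tp =>
        if pvIsAllowed (pvTagOf fp.2) (pvTagOf tp.2) then acc2 ++ [(fp.1, tp.1)] else acc2) acc) []
      = lwb.flatMap (fun fp =>
          (lwb.filter (fun tp => pvIsAllowed (pvTagOf fp.2) (pvTagOf tp.2))).map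
            (fun tp => (fp.1, tp.1))) := by
    have h1 : lwb.foldl (fun acc fp =>
        lwb.foldl (fun acc2 tp =>
          if pvIsAllowed (pvTagOf fp.2) (pvTagOf tp.2) then acc2 ++ [(fp.1, tp.1)] else acc2) acc) []
        = lwb.foldl (fun acc fp =>
            acc ++ (lwb.filter (fun tp => pvIsAllowed (pvTagOf fp.2) (pvTagOf tp.2))).map
              (fun tp => (fp.1, tp.1))) [] :=
      PySem.List.foldl_congr_mem _ _ _ _ (fun acc fp _ => PySem.List.foldl_append_if _ _ _ _)
    rw [h1, PySem.List.foldl_append_eq_flatMap, List.nil_append]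
  rw [hA, PySem.List.foldl_append_eq_flatMap, List.nil_append, List.flatMap_map]
  apply List.flatMap_congr
  intro fp hfp
  show _ = ((pvNextTags.keys.foldl _ PySem.Dict.empty).getD (pvTagOf fp.2) []).map _
  rw [pv_targets_getD _ _ (hall fp hfp)]
  exact pv_row_eq lwb hall fp hfp

theorem pv_hall (labels : List (Int × String)) (hpre : Pre_streusle_allowed_transitions labels)
    (n : Int) :
    ∀ p ∈ labels ++ [(n, "START"), (n + 1, "END")], pvTagOf p.2 ∈ pvValidTags := by
  intro p hp
  rcases List.mem_append.mp hp with h | h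
  · exact hpre p h
  · simp only [List.mem_cons, List.not_mem_nil, or_false] at h
    rcases h with h | h <;> subst h
    · exact (by decide : pvTagOf "START" ∈ pvValidTags)
    · exact (by decide : pvTagOf "END" ∈ pvValidTags)

-- ===== VERDICT (by name: the statement is the Claim_ definition above) =====
theorem streusle_allowed_transitions_spec : Claim_equal_streusle_allowed_transitions := by
  intro labels _ hpre
  show streusle_allowed_transitions labels = streusle_allowed_transitions_alt labels
  exact pv_main (labels ++ [((labels.length : Int), "START"), ((labels.length : Int) + 1, "END")])
    (pv_hall labels hpre _)
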